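-- pv_equiv track=rewrite | github.com/drprfitay/fitness_learning | code/sequence_space_utils.py | align_sequences
-- ===== SOURCE A (Python) =====
-- def align_sequences(misaligned_seq):
--     copy_indices = []
--     shift_counter = 0
--     copied_counter = 0
--
--
--     for i,s in enumerate(misaligned_seq):
--         if s == "-":
--             shift_counter += 1
--         else:
--             copy_indices.append(copied_counter + shift_counter + 1)
--             copied_counter += 1
--
--     return copy_indices, shift_counter, copied_counter
-- ===== SOURCE B (Python) =====
-- def align_sequences(misaligned_seq):
--     # Split on the gap character: each non-gap character lies in some part.
--     parts = misaligned_seq.split("-")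
--     copy_indices = []
--     offset = 0
--     for part in parts:
--         copy_indices.extend(range(offset + 1, offset + len(part) + 1))
--         offset += len(part) + 1
--     shift_counter = len(parts) - 1
--     return copy_indices, shift_counter, len(misaligned_seq) - shift_counter
-- ===== Notes on version B (the rewrite author's own statement) =====
-- stated objective: faster
-- what changed: B splits the string on the gap character and reconstructs the alignment indices as whole ranges per gap-free segment (offset bookkeeping over segments), deriving the gap count from the number of parts and the copy count from lengths, instead of A's per-character scan with three threaded accumulators.
import Mathlib
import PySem

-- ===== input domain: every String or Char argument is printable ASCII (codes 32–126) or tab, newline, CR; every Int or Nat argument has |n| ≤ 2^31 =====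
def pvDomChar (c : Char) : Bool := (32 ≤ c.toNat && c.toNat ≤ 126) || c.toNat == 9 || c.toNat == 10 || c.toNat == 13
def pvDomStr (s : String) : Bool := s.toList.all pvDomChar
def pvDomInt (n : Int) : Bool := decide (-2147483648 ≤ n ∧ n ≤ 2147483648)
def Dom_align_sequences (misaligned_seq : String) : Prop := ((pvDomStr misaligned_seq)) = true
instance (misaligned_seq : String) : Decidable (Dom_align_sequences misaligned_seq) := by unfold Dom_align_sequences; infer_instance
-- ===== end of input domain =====

-- B splits the string on '-' and emits one contiguous index range per gap-free segment, deriving the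
-- counters from the number of parts and the total length; same results by a different decomposition.

-- ===== PORT A =====
-- the body of A's for-loop, as a named step function over the threaded state (copy_indices, shift, copied)
def alignStep (st : List Int × Int × Int) (p : Int × Char) : List Int × Int × Int :=
  if p.2 = '-' then (st.1, st.2.1 + 1, st.2.2)
  else (st.1 ++ [st.2.2 + st.2.1 + 1], st.2.1, st.2.2 + 1)

def align_sequences (misaligned_seq : String) : List Int × Int × Int :=
  (PySem.List.enumerate misaligned_seq.toList 0).foldl alignStep
    (([] : List Int), (0 : Int), (0 : Int))

-- ===== PORT B =====
-- the body of B's for-loop over the parts: extend with range(offset+1, offset+len(part)+1), advance offset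
def alignPartStep (st : List Int × Int) (part : List Char) : List Int × Int :=
  (st.1 ++ PySem.List.pyRange (st.2 + 1) (st.2 + part.length + 1) 1, st.2 + part.length + 1)

def align_sequences_alt (misaligned_seq : String) : List Int × Int × Int :=
  let parts := PySem.Chars.splitOn misaligned_seq.toList ['-']   -- misaligned_seq.split("-")
  let res := parts.foldl alignPartStep (([] : List Int), (0 : Int))
  let shift_counter : Int := (parts.length : Int) - 1
  (res.1, shift_counter, (PySem.Chars.len misaligned_seq.toList : Int) - shift_counter)

-- ===== PRECONDITION & SPEC =====
def Spec_align_sequences (misaligned_seq : String) (out : List Int × Int × Int) : Prop := out = align_sequences_alt misaligned_seq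
instance (misaligned_seq : String) (out : List Int × Int × Int) : Decidable (Spec_align_sequences misaligned_seq out) := by unfold Spec_align_sequences; infer_instance

-- ===== CLAIM (what is proved, stated in full; the proofs are below) =====
def Claim_equal_align_sequences : Prop := ∀ (misaligned_seq : String), Dom_align_sequences misaligned_seq → Spec_align_sequences misaligned_seq (align_sequences misaligned_seq)

-- ===== LEMMAS AND PROOFS =====

-- the element A appends / skips, as an Option over an enumerated pair (non-'-' at index i ↦ i+1)
def alignPick (p : Int × Char) : Option Int :=
  if p.2 ≠ '-' then some (p.1 + 1) else none

theorem alignStep_gap (st : List Int × Int × Int) (i : Int) :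
    alignStep st (i, '-') = (st.1, st.2.1 + 1, st.2.2) := by simp [alignStep]

theorem alignStep_keep (st : List Int × Int × Int) (i : Int) {c : Char} (h : c ≠ '-') :
    alignStep st (i, c) = (st.1 ++ [st.2.2 + st.2.1 + 1], st.2.1, st.2.2 + 1) := by
  simp [alignStep, h]

theorem alignPick_gap (i : Int) : alignPick (i, '-') = none := by simp [alignPick]

theorem alignPick_keep (i : Int) {c : Char} (h : c ≠ '-') :
    alignPick (i, c) = some (i + 1) := by simp [alignPick, h]

-- A's loop over any suffix: with state (acc, sh, cp) and enumerate start sh + cp,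
-- it appends exactly the filterMap values and adds the two countP's to the counters.
theorem align_loop_eq (l : List Char) : ∀ (sh cp : Int) (acc : List Int),
    (PySem.List.enumerate l (sh + cp)).foldl alignStep (acc, sh, cp)
    = (acc ++ (PySem.List.enumerate l (sh + cp)).filterMap alignPick,
       sh + (l.countP (· = '-') : Int), cp + (l.countP (· ≠ '-') : Int)) := by
  induction l with
  | nil => intro sh cp acc; simp [PySem.List.enumerate_nil]
  | cons c l ih =>
    intro sh cp acc
    rw [PySem.List.enumerate_cons, List.foldl_cons, List.filterMap_cons]
    by_cases hc : c = '-'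
    · subst hc
      rw [alignStep_gap, alignPick_gap]
      have h1 : sh + cp + 1 = (sh + 1) + cp := by ring
      rw [h1, ih (sh + 1) cp acc]
      refine Prod.ext rfl (Prod.ext ?_ ?_) <;> (simp; try ring)
    · rw [alignStep_keep _ _ hc, alignPick_keep _ hc]
      have h1 : sh + cp + 1 = sh + (cp + 1) := by ring
      rw [h1, ih sh (cp + 1) (acc ++ [cp + sh + 1])]
      refine Prod.ext ?_ (Prod.ext ?_ ?_)
      · simp; ring_nf
      · simp [hc]
      · simp [hc]; ring

-- reference single-char splitter, current chunk carried in order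
def mySplit : List Char → List Char → List (List Char)
  | [], cur => [cur]
  | c :: rest, cur => if c = '-' then cur :: mySplit rest [] else mySplit rest (cur ++ [c])

theorem splitOn_go_eq (sep : List Char) (hsep : sep = ['-']) :
    ∀ (fuel : Nat) (l cur : List Char) (acc : List (List Char)), l.length < fuel →
    PySem.Chars.splitOn.go sep fuel l cur acc = acc.reverse ++ (mySplit l cur.reverse).map id := by
  subst hsep
  intro fuel
  induction fuel with
  | zero => intro l cur acc h; omega
  | succ f ih =>
    intro l cur acc h
    cases l with
    | nil => simp [PySem.Chars.splitOn.go, mySplit]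
    | cons c rest =>
      by_cases hc : c = '-'
      · subst hc
        rw [show PySem.Chars.splitOn.go ['-'] (f+1) ('-' :: rest) cur acc
              = PySem.Chars.splitOn.go ['-'] f rest [] (cur.reverse :: acc) from by
            simp [PySem.Chars.splitOn.go, List.isPrefixOf]]
        rw [ih rest [] (cur.reverse :: acc) (by simpa using Nat.lt_of_succ_lt_succ h)]
        simp [mySplit]
      · rw [show PySem.Chars.splitOn.go ['-'] (f+1) (c :: rest) cur acc
              = PySem.Chars.splitOn.go ['-'] f rest (c :: cur) acc from by
            simp [PySem.Chars.splitOn.go, List.isPrefixOf, Ne.symm hc]]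
        rw [ih rest (c :: cur) acc (by simpa using Nat.lt_of_succ_lt_succ h)]
        simp [mySplit, hc]

theorem splitOn_eq_mySplit (l : List Char) :
    PySem.Chars.splitOn l ['-'] = mySplit l [] := by
  have := splitOn_go_eq ['-'] rfl (l.length + 1) l [] [] (by omega)
  simpa [PySem.Chars.splitOn] using this

theorem mySplit_length (l : List Char) : ∀ cur,
    (mySplit l cur).length = l.countP (· = '-') + 1 := by
  induction l with
  | nil => intro cur; simp [mySplit]
  | cons c rest ih =>
    intro cur
    by_cases hc : c = '-'
    · subst hc; simp [mySplit, ih]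
    · simp [mySplit, hc, ih]

theorem pyRange_snoc (a : Int) (n : Nat) :
    PySem.List.pyRange a (a + n + 1) 1 = PySem.List.pyRange a (a + n) 1 ++ [a + n] := by
  have := PySem.List.pyRange_one_succ_right (a := a) (b := a + n) (by omega)
  simpa using this

-- B's fold over the parts of l (with cur already consumed at offset o) rebuilds A's picks
theorem alt_loop_eq (l : List Char) : ∀ (cur : List Char) (o : Int) (acc : List Int),
    ((mySplit l cur).foldl alignPartStep (acc, o)).1
    = acc ++ PySem.List.pyRange (o + 1) (o + cur.length + 1) 1
          ++ (PySem.List.enumerate l (o + cur.length)).filterMap alignPick := by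
  induction l with
  | nil =>
    intro cur o acc
    simp [mySplit, alignPartStep, PySem.List.enumerate_nil]
  | cons c rest ih =>
    intro cur o acc
    by_cases hc : c = '-'
    · subst hc
      rw [show mySplit ('-' :: rest) cur = cur :: mySplit rest [] from by simp [mySplit]]
      rw [List.foldl_cons]
      rw [show alignPartStep (acc, o) cur
            = (acc ++ PySem.List.pyRange (o + 1) (o + cur.length + 1) 1, o + cur.length + 1) from rfl]
      rw [ih [] (o + cur.length + 1) _]
      rw [PySem.List.enumerate_cons, List.filterMap_cons, alignPick_gap]
      simp [PySem.List.pyRange_one_eq_nil, add_assoc]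
    · rw [show mySplit (c :: rest) cur = mySplit rest (cur ++ [c]) from by simp [mySplit, hc]]
      rw [ih (cur ++ [c]) o acc]
      rw [PySem.List.enumerate_cons, List.filterMap_cons, alignPick_keep _ hc]
      have hr : PySem.List.pyRange (o + 1) (o + ((cur ++ [c]).length : Int) + 1) 1
          = PySem.List.pyRange (o + 1) (o + cur.length + 1) 1 ++ [o + cur.length + 1] := by
        have := pyRange_snoc (o + 1) cur.length
        simpa [add_assoc, add_comm, add_left_comm] using this
      rw [hr]
      simp [add_assoc]

theorem countP_ne_eq (l : List Char) :
    (l.countP (fun x => !decide (x = '-')) : Int)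
      = (l.length : Int) - (l.countP (fun x => decide (x = '-')) : Int) := by
  induction l with
  | nil => simp
  | cons c rest ih =>
    by_cases hc : c = '-' <;> simp [hc] <;> omega

-- ===== VERDICT (by name: the statement is the Claim_ definition above) =====
theorem align_sequences_spec : Claim_equal_align_sequences := by
  intro s _
  unfold Spec_align_sequences align_sequences align_sequences_alt
  have hA := align_loop_eq s.toList 0 0 []
  simp only [zero_add, add_zero] at hA
  rw [hA]
  rw [splitOn_eq_mySplit]
  have hB := alt_loop_eq s.toList [] 0 []
  simp only [List.length_nil, Nat.cast_zero, add_zero, zero_add, List.nil_append] at hB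
  refine Prod.ext ?_ (Prod.ext ?_ ?_)
  · rw [hB]
    rw [PySem.List.pyRange_one_eq_nil (a := (1:Int)) (le_refl _)]
  · simp [mySplit_length]
  · simp only [PySem.Chars.len_eq, mySplit_length]
    have h := countP_ne_eq s.toList
    have h2 : (s.toList.countP (· ≠ '-') : Int) = (s.toList.countP (fun x => !decide (x = '-')) : Int) := by
      simp
    rw [h2, h]
    push_cast
    omega
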